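-- pv_equiv track=rewrite | github.com/xncaffe/ArtMixQuant | common/artMixCommonFunc.py | delete_invalid_param
-- ===== SOURCE A (Python) =====
-- import copy
--
-- def delete_invalid_param(set_json: dict):
--     out_set_json=copy.deepcopy(set_json)
--     for set_op_name in out_set_json.keys():
--         out_set_json_op = copy.deepcopy(out_set_json[set_op_name])
--         for param_name in out_set_json_op.keys():
--             if param_name == "bit_width":
--                 continue
--             del out_set_json[set_op_name][param_name]
--     return out_set_json
-- ===== SOURCE B (Python) =====
-- import copy
--
-- def delete_invalid_param(set_json: dict):
--     # Build the result directly: keep only 'bit_width' (deep-copied) per op, no delete loop.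
--     return {
--         op: ({"bit_width": copy.deepcopy(params["bit_width"])} if "bit_width" in params else {})
--         for op, params in set_json.items()
--     }
-- ===== Notes on version B (the rewrite author's own statement) =====
-- stated objective: simpler
-- what changed: Instead of deep-copying the whole structure and running an inner loop that deletes every non-bit_width param from each op's dict, B builds the output dict directly with one membership check and one lookup per op, emitting {'bit_width': deepcopy(value)} or an empty dict.
import Mathlib
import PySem

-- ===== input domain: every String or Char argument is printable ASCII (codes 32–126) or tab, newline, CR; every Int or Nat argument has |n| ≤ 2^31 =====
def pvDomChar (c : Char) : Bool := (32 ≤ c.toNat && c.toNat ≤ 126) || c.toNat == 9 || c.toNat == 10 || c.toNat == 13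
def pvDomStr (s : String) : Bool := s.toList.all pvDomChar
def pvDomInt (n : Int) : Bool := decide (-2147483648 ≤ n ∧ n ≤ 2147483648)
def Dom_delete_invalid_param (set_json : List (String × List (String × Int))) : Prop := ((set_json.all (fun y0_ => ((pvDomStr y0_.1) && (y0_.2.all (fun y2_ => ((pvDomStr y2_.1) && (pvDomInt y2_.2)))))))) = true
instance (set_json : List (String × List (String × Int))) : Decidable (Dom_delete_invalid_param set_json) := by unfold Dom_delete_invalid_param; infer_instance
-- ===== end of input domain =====

-- B builds the output dict directly (one membership lookup per op, keeping only 'bit_width')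
-- instead of A's deepcopy-then-delete inner loop; objective: simpler.

-- ===== PORT A =====
-- del out_set_json[set_op_name][param_name]: replace the (unique, under Pre_) entry for `op`
-- by its param dict with `pname` removed (dict deletion via PySem.Dict.erase).
def pvEraseParam (out : List (String × List (String × Int))) (op pname : String) :
    List (String × List (String × Int)) :=
  out.map (fun e => if e.1 == op then (e.1, ((PySem.Dict.mk e.2).erase pname).items) else e)

-- body of the inner `for param_name in out_set_json_op.keys():` loop
def pvInner (op : String) (out2 : List (String × List (String × Int))) (pv : String × Int) :
    List (String × List (String × Int)) :=
  if pv.1 == "bit_width" then out2 else pvEraseParam out2 op pv.1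

-- body of the outer `for set_op_name in out_set_json.keys():` loop
-- (out_set_json[set_op_name]: the key is always present, so the `[]` default is never used)
def pvOpStep (out1 : List (String × List (String × Int))) (op : String) :
    List (String × List (String × Int)) :=
  ((List.lookup op out1).getD []).foldl (pvInner op) out1

def delete_invalid_param (set_json : List (String × List (String × Int))) :
    List (String × List (String × Int)) :=
  (set_json.map Prod.fst).foldl pvOpStep set_json

-- ===== PORT B =====
def delete_invalid_param_alt (set_json : List (String × List (String × Int))) :
    List (String × List (String × Int)) :=
  set_json.map (fun e =>
    (e.1,
      match List.lookup "bit_width" e.2 with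
      | some v => [("bit_width", v)]
      | none => []))

-- ===== PRECONDITION & SPEC =====
-- Pre_ excludes only association lists with duplicate keys (outer op names or param names
-- within one op), which do not represent any Python dict — A's input is a dict, whose keys
-- are unique, so this excludes no input the Python A can receive.
def Pre_delete_invalid_param (set_json : List (String × List (String × Int))) : Prop :=
  (set_json.map Prod.fst).Nodup ∧ ∀ p ∈ set_json, (p.2.map Prod.fst).Nodup
instance (set_json : List (String × List (String × Int))) : Decidable (Pre_delete_invalid_param set_json) := by
  unfold Pre_delete_invalid_param; infer_instance

def pvWitness_delete_invalid_param : (List (String × List (String × Int))) :=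
  [("conv", [("bit_width", 8), ("scale", 2)]), ("relu", [])]

def Spec_delete_invalid_param (set_json : List (String × List (String × Int))) (out : List (String × List (String × Int))) : Prop := out = delete_invalid_param_alt set_json
instance (set_json : List (String × List (String × Int))) (out : List (String × List (String × Int))) : Decidable (Spec_delete_invalid_param set_json out) := by unfold Spec_delete_invalid_param; infer_instance

-- ===== CLAIM (what is proved, stated in full; the proofs are below) =====
def Claim_equal_delete_invalid_param : Prop := ∀ (set_json : List (String × List (String × Int))), Dom_delete_invalid_param set_json → Pre_delete_invalid_param set_json → Spec_delete_invalid_param set_json (delete_invalid_param set_json)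

-- ===== LEMMAS AND PROOFS =====

-- the value A's inner loop leaves in out_set_json[op] when the snapshot of params is `params`
def pvPurge (params acc : List (String × Int)) : List (String × Int) :=
  params.foldl (fun ps pv => if pv.1 == "bit_width" then ps else ps.filter (fun q => !(q.1 == pv.1))) acc

lemma lookup_append_left_none (a : String) (l1 l2 : List (String × List (String × Int)))
    (h : a ∉ l1.map Prod.fst) : List.lookup a (l1 ++ l2) = List.lookup a l2 := by
  induction l1 with
  | nil => simp
  | cons x xs ih =>
    simp only [List.map_cons, List.mem_cons, not_or] at h
    obtain ⟨x1, x2⟩ := x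
    simp only [List.cons_append, List.lookup_cons]
    have : (a == x1) = false := by simpa using h.1
    rw [this]
    exact ih h.2

lemma map_if_id (l : List (String × List (String × Int))) (op : String)
    (g : String × List (String × Int) → String × List (String × Int))
    (h : op ∉ l.map Prod.fst) :
    l.map (fun e => if e.1 == op then g e else e) = l := by
  conv_rhs => rw [← List.map_id l]
  apply List.map_congr_left
  intro e he
  have : (e.1 == op) = false := by
    simp only [beq_eq_false_iff_ne]
    intro hc; exact h (hc ▸ List.mem_map_of_mem he)
  simp [this]

lemma eraseParam_localize (op pname : String) (ps : List (String × Int))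
    (pre post : List (String × List (String × Int)))
    (hpre : op ∉ pre.map Prod.fst) (hpost : op ∉ post.map Prod.fst) :
    pvEraseParam (pre ++ (op, ps) :: post) op pname
      = pre ++ (op, ps.filter (fun q => !(q.1 == pname))) :: post := by
  unfold pvEraseParam
  rw [List.map_append, List.map_cons, map_if_id pre op _ hpre, map_if_id post op _ hpost]
  simp [PySem.Dict.erase]

lemma inner_localize (op : String) (params : List (String × Int)) (ps : List (String × Int))
    (pre post : List (String × List (String × Int)))
    (hpre : op ∉ pre.map Prod.fst) (hpost : op ∉ post.map Prod.fst) :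
    params.foldl (pvInner op) (pre ++ (op, ps) :: post)
      = pre ++ (op, pvPurge params ps) :: post := by
  induction params generalizing ps with
  | nil => simp [pvPurge]
  | cons pv params ih =>
    simp only [List.foldl_cons, pvPurge, pvInner]
    by_cases h : (pv.1 == "bit_width") = true
    · rw [if_pos h, if_pos h]; exact ih ps
    · rw [if_neg h, if_neg h, eraseParam_localize op pv.1 ps pre post hpre hpost]
      exact ih _

lemma purge_filter (params acc : List (String × Int)) :
    pvPurge params acc
      = acc.filter (fun e => e.1 == "bit_width" ||
          params.all (fun q => (q.1 == "bit_width") || !(q.1 == e.1))) := by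
  induction params generalizing acc with
  | nil => simp [pvPurge]
  | cons q params ih =>
    simp only [pvPurge, List.foldl_cons] at *
    by_cases h : (q.1 == "bit_width") = true
    · rw [if_pos h, ih]
      apply List.filter_congr
      intro e _
      simp only [List.all_cons, h, Bool.true_or, Bool.true_and]
    · rw [if_neg h, ih, List.filter_filter]
      have h' : (q.1 == "bit_width") = false := by simpa using h
      apply List.filter_congr
      intro e _
      by_cases he : (q.1 == e.1) = true
      · have hq : q.1 = e.1 := by simpa using he
        have hbw : (e.1 == "bit_width") = false := by rw [← hq]; exact h'
        simp [List.all_cons, hbw, h', he, show (e.1 == q.1) = true from by simp [hq]]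
      · have hq : q.1 ≠ e.1 := by simpa using he
        simp [List.all_cons, h', show (q.1 == e.1) = false from by simpa using hq,
          show (e.1 == q.1) = false from by simpa using hq.symm]

lemma purge_self (ps : List (String × Int)) :
    pvPurge ps ps = ps.filter (fun e => e.1 == "bit_width") := by
  rw [purge_filter]
  apply List.filter_congr
  intro e he
  by_cases h : (e.1 == "bit_width") = true
  · simp [h]
  · have : ¬ ps.all (fun q => (q.1 == "bit_width") || !(q.1 == e.1)) := by
      simp only [List.all_eq_true, not_forall]
      exact ⟨e, he, by simp [h]⟩
    simp only [h, Bool.false_or]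
    simp [this]

lemma keepBW_eq_alt (ps : List (String × Int)) (hp : (ps.map Prod.fst).Nodup) :
    ps.filter (fun e => e.1 == "bit_width")
      = (match List.lookup "bit_width" ps with
         | some v => [("bit_width", v)]
         | none => []) := by
  induction ps with
  | nil => simp
  | cons x xs ih =>
    obtain ⟨k, v⟩ := x
    simp only [List.map_cons, List.nodup_cons] at hp
    by_cases h : (k == "bit_width") = true
    · have hk : k = "bit_width" := by simpa using h
      have hbw : "bit_width" ∉ xs.map Prod.fst := hk ▸ hp.1
      have hx : xs.filter (fun e => e.1 == "bit_width") = [] := by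
        rw [List.filter_eq_nil_iff]
        intro e he hc
        have hce : e.1 = "bit_width" := by simpa using hc
        exact hbw (hce ▸ List.mem_map_of_mem he)
      simp [hk, hx]
    · rw [List.filter_cons]
      simp only [h]
      rw [List.lookup_cons]
      have hkk : ("bit_width" == k) = false := by
        simp only [beq_eq_false_iff_ne]
        intro hc; exact absurd (by simp [hc.symm]) h
      rw [hkk]
      simpa using ih hp.2

lemma outer_fold (post pre : List (String × List (String × Int)))
    (hn : ((pre ++ post).map Prod.fst).Nodup) :
    (post.map Prod.fst).foldl pvOpStep (pre ++ post)
      = pre ++ post.map (fun e => (e.1, pvPurge e.2 e.2)) := by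
  induction post generalizing pre with
  | nil => simp
  | cons e post ih =>
    obtain ⟨op, ps⟩ := e
    have hmap : ((pre ++ (op, ps) :: post).map Prod.fst)
        = pre.map Prod.fst ++ op :: post.map Prod.fst := by simp
    rw [hmap] at hn
    have hmid := List.nodup_middle.mp hn
    rw [List.nodup_cons] at hmid
    have hpre : op ∉ pre.map Prod.fst := fun hc => hmid.1 (List.mem_append_left _ hc)
    have hpost : op ∉ post.map Prod.fst := fun hc => hmid.1 (List.mem_append_right _ hc)
    simp only [List.map_cons, List.foldl_cons]
    have hstep : pvOpStep (pre ++ (op, ps) :: post) op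
        = (pre ++ [(op, pvPurge ps ps)]) ++ post := by
      unfold pvOpStep
      rw [lookup_append_left_none op pre _ hpre]
      simp only [List.lookup_cons, BEq.rfl, Option.getD_some]
      rw [inner_localize op ps ps pre post hpre hpost]
      simp
    rw [hstep, ih (pre ++ [(op, pvPurge ps ps)]) (by simpa using hn)]
    simp

-- ===== VERDICT (by name: the statement is the Claim_ definition above) =====
theorem delete_invalid_param_spec : Claim_equal_delete_invalid_param := by
  intro s _ hpre
  unfold Spec_delete_invalid_param delete_invalid_param delete_invalid_param_alt
  have := outer_fold s [] (by simpa using hpre.1)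
  simp only [List.nil_append] at this
  rw [this]
  apply List.map_congr_left
  intro e he
  rw [purge_self, keepBW_eq_alt e.2 (hpre.2 e he)]
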